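-- pv_equiv track=rewrite | github.com/ZeGmX/PiflouzBot | src/embed_messages.py | get_ranking_str
-- ===== SOURCE A (Python) =====
-- def get_ranking_str(list):
--     """
--     Returns a string representing the ranking for a given score
--
--     Parameters
--     ----------
--     list (List[(str, int)]):
--         (user id, score)
--
--     Returns
--     -------
--     res (str)
--     """
--     res = ""
--     previous_val, previous_index = 0, 0
--     vals = sorted(list, key=lambda key_val: -key_val[1])
--
--     if len(vals) == 0:
--         return res
--
--     for i, (user_id, val) in enumerate(vals):
--         if i == 10: break  # The embed has a limited size so we limit the amount of user in each ranking
--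
--         index = i if val != previous_val else previous_index
--         previous_val, previous_index = val, index
--         res += f"{index + 1}: <@{user_id}> - {val}\n"
--     return res
-- ===== SOURCE B (Python) =====
-- def get_ranking_str(list):
--     vals = sorted(list, key=lambda kv: -kv[1])
--     return "".join(
--         f"{1 + sum(1 for _, w in vals if w > val)}: <@{user_id}> - {val}\n"
--         for user_id, val in vals[:10]
--     )
-- ===== Notes on version B (the rewrite author's own statement) =====
-- stated objective: simpler
-- what changed: Replaces the running previous_val/previous_index accumulator with a direct count-strictly-greater rank for each of the first 10 sorted entries, joined in one expression.
import Mathlib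
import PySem

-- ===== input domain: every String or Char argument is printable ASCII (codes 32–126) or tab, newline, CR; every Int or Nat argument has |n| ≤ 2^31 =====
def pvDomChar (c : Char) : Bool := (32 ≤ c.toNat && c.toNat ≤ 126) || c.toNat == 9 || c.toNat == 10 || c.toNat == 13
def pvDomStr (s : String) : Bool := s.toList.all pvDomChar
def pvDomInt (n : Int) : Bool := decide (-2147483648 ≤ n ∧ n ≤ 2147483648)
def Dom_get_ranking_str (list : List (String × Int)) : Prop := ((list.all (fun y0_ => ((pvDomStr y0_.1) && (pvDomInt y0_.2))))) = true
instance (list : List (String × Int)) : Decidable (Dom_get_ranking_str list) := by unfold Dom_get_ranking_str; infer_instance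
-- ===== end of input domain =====

-- B replaces A's running previous_val/previous_index accumulator by a direct
-- count-of-strictly-greater rank for each of the first 10 sorted entries (simpler decomposition).


-- shared formatting helper: the characters of f"{rank}: <@{uid}> - {v}\n"
def pvLine (rank : Int) (uid : String) (v : Int) : List Char :=
  PySem.Int.toChars rank ++ (": <@").toList ++ uid.toList ++ ("> - ").toList
    ++ PySem.Int.toChars v ++ ['\n']

-- ===== PORT A =====
-- A's loop: enumerate over the sorted list, break at i == 10, carrying
-- previous_val, previous_index and the accumulated output (as List Char).
def pvALoop : List (String × Int) → Nat → Int → Int → List Char → List Char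
  | [], _, _, _, res => res
  | (uid, v) :: rest, i, pv, pidx, res =>
    if i = 10 then res
    else
      let index : Int := if v ≠ pv then (i : Int) else pidx
      pvALoop rest (i + 1) v index (res ++ pvLine (index + 1) uid v)

def get_ranking_str (list : List (String × Int)) : String :=
  let vals := PySem.List.sorted list (fun kv => -kv.2) false
  if vals.length = 0 then ""
  else String.ofList (pvALoop vals 0 0 0 [])

-- ===== PORT B =====
-- B: rank of an entry = 1 + number of strictly greater scores in the sorted list;
-- format the first 10 entries and concatenate.
def get_ranking_str_alt (list : List (String × Int)) : String :=
  let vals := PySem.List.sorted list (fun kv => -kv.2) false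
  String.ofList
    (((vals.take 10).map
        (fun x => pvLine (1 + (vals.countP (fun kv => decide (x.2 < kv.2)) : Int)) x.1 x.2)).flatten)

-- ===== PRECONDITION & SPEC =====
def Spec_get_ranking_str (list : List (String × Int)) (out : String) : Prop := out = get_ranking_str_alt list
instance (list : List (String × Int)) (out : String) : Decidable (Spec_get_ranking_str list out) := by unfold Spec_get_ranking_str; infer_instance

-- ===== CLAIM (what is proved, stated in full; the proofs are below) =====
def Claim_equal_get_ranking_str : Prop := ∀ (list : List (String × Int)), Dom_get_ranking_str list → Spec_get_ranking_str list (get_ranking_str list)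

-- ===== LEMMAS AND PROOFS =====

-- The main loop invariant: if vals = p ++ l is nonincreasing in the score, the loop position
-- is p.length ≤ 10, and (pv, pidx) are either the initial (0,0) with p = [] or the score of
-- p's last element together with its competition rank, then A's loop produces exactly B's lines.
lemma pvALoop_eq (vals : List (String × Int))
    (hsort : vals.Pairwise (fun a b => b.2 ≤ a.2)) :
    ∀ (l p : List (String × Int)) (pv pidx : Int) (res : List Char),
      vals = p ++ l → p.length ≤ 10 →
      ((p = [] ∧ pv = 0 ∧ pidx = 0) ∨
        (p ≠ [] ∧ (∀ x ∈ p, pv ≤ x.2) ∧ (∀ x ∈ l, x.2 ≤ pv) ∧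
          pidx = (vals.countP (fun kv => decide (pv < kv.2)) : Int))) →
      pvALoop l p.length pv pidx res =
        res ++ ((l.take (10 - p.length)).map
          (fun x => pvLine (1 + (vals.countP (fun kv => decide (x.2 < kv.2)) : Int)) x.1 x.2)).flatten := by
  intro l
  induction l with
  | nil =>
    intro p pv pidx res _ _ _
    simp [pvALoop]
  | cons hd rest ih =>
    intro p pv pidx res hsplit hlen hinv
    obtain ⟨uid, v⟩ := hd
    by_cases h10 : p.length = 10
    · simp [pvALoop, h10]
    · have hlt : p.length < 10 := lt_of_le_of_ne hlen h10
      -- facts from sortedness of vals = p ++ (uid,v) :: rest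
      rw [hsplit] at hsort
      have hpair := hsort
      rw [List.pairwise_append] at hpair
      obtain ⟨hp, hc, hcross⟩ := hpair
      rw [List.pairwise_cons] at hc
      obtain ⟨hrest_le, _⟩ := hc
      -- each element of rest has score ≤ v
      -- index = countP vals (· > v)
      have hcount : (if v ≠ pv then ((p.length : Nat) : Int) else pidx)
          = ((p ++ (uid, v) :: rest).countP (fun kv => decide (v < kv.2)) : Int) := by
        rcases hinv with ⟨hpnil, hpv0, hpi0⟩ | ⟨hpne, hple, hlge, hpidx⟩
        · subst hpnil hpv0 hpi0
          have : ((uid, v) :: rest).countP (fun kv => decide (v < kv.2)) = 0 := by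
            rw [List.countP_eq_zero]
            intro a ha
            simp only [List.mem_cons] at ha
            rcases ha with rfl | ha
            · simp
            · have := hrest_le a ha
              simp; omega
          simp [this]
        · by_cases hv : v = pv
          · subst hv
            simp only [ne_eq, not_true_eq_false, if_false]
            rw [hpidx, hsplit]
          · have hvlt : v < pv := by
              have := hlge (uid, v) (by simp)
              omega
            simp only [ne_eq, hv, not_false_eq_true, if_true]
            have h1 : p.countP (fun kv => decide (v < kv.2)) = p.length := by
              rw [List.countP_eq_length]
              intro a ha
              have := hple a ha
              simp; omega
            have h2 : ((uid, v) :: rest).countP (fun kv => decide (v < kv.2)) = 0 := by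
              rw [List.countP_eq_zero]
              intro a ha
              simp only [List.mem_cons] at ha
              rcases ha with rfl | ha
              · simp
              · have := hrest_le a ha
                simp; omega
            rw [List.countP_append, h1, h2]
            simp
      -- unfold one loop step
      have hstep : pvALoop ((uid, v) :: rest) p.length pv pidx res =
          pvALoop rest (p.length + 1) v (if v ≠ pv then ((p.length : Nat) : Int) else pidx)
            (res ++ pvLine ((if v ≠ pv then ((p.length : Nat) : Int) else pidx) + 1) uid v) := by
        simp only [pvALoop, h10, if_false]
      rw [hstep, hcount]
      -- apply induction hypothesis with p' = p ++ [(uid, v)]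
      have hlen' : (p ++ [(uid, v)]).length = p.length + 1 := by simp
      have ihres := ih (p ++ [(uid, v)]) v
        (((p ++ (uid, v) :: rest).countP (fun kv => decide (v < kv.2)) : Int))
        (res ++ pvLine (((p ++ (uid, v) :: rest).countP (fun kv => decide (v < kv.2)) : Int) + 1) uid v)
        (by simp [hsplit]) (by simp; omega)
        (by
          right
          refine ⟨by simp, ?_, ?_, by rw [hsplit]⟩
          · intro x hx
            simp only [List.mem_append, List.mem_singleton] at hx
            rcases hx with hx | rfl
            · rcases hinv with ⟨hpnil, _, _⟩ | ⟨_, hple, hlge, _⟩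
              · subst hpnil; simp at hx
              · have h1 := hple x hx
                have h2 := hlge (uid, v) (by simp)
                omega
            · exact le_refl _
          · intro x hx
            exact hrest_le x hx)
      rw [hlen'] at ihres
      rw [ihres]
      have htake : ((uid, v) :: rest).take (10 - p.length)
          = (uid, v) :: rest.take (10 - (p.length + 1)) := by
        have : 10 - p.length = (10 - (p.length + 1)) + 1 := by omega
        rw [this, List.take_succ_cons]
      rw [htake]
      simp [hsplit, List.append_assoc, add_comm]

theorem get_ranking_str_spec : Claim_equal_get_ranking_str := by
  intro list _
  unfold Spec_get_ranking_str get_ranking_str get_ranking_str_alt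
  set vals := PySem.List.sorted list (fun kv => -kv.2) false with hvals
  have hsort : vals.Pairwise (fun a b => b.2 ≤ a.2) := by
    have := PySem.List.sorted_pairwise list (fun kv => -kv.2)
    rw [← hvals] at this
    exact this.imp (by intro a b h; omega)
  by_cases hnil : vals.length = 0
  · have : vals = [] := List.length_eq_zero_iff.mp hnil
    simp [this]
  · simp only [hnil, if_false]
    have := pvALoop_eq vals hsort vals [] 0 0 [] (by simp) (by simp) (by simp)
    simp only [List.length_nil, List.nil_append] at this
    rw [this]
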